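-- pv_equiv track=rewrite | github.com/avinaykalyanreddy/TUF | contest/Find the Score Difference in a Game.py | scoreDifference
-- ===== SOURCE A (Python) =====
-- from typing import List
--
-- def scoreDifference(nums: List[int]) -> int:
--     player1 = 0
--     player2 = 0
--
--     x = True
--     y = False
--
--     low = 0
--
--     for i in range(len(nums)):
--
--         if nums[i] % 2 == 1:
--
--             if x:
--
--                 y = True
--                 x = False
--
--             else:
--
--                 x = True
--                 y = False
--
--         if i - low == 5:
--
--             if x:
--
--                 y = True
--                 x = False
--
--             else:
--
--                 x = True
--                 y = False
--
--             low = i + 1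
--
--         if x:
--             player1 += nums[i]
--
--         else:
--
--             player2 += nums[i]
--
--     return (player1 - player2)
-- ===== SOURCE B (Python) =====
-- from typing import List
--
-- def scoreDifference(nums: List[int]) -> int:
--     # Closed form: the sign of nums[i] is (-1)**(number of odd values in nums[0..i] + (i+1)//6).
--     # Staged passes: build the inclusive prefix counts of odd values, then sum with that sign.
--     prefix = []
--     c = 0
--     for v in nums:
--         c += v % 2
--         prefix.append(c)
--     return sum(v * (-1) ** ((c + (i + 1) // 6) % 2) for i, (v, c) in enumerate(zip(nums, prefix)))
-- ===== Notes on version B (the rewrite author's own statement) =====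
-- stated objective: alternative
-- what changed: Derives a closed form for each element's sign, (-1)^(prefix count of odd values up to i + (i+1)//6), and computes the answer in staged passes (prefix-count list, then a signed sum over enumerate/zip), eliminating A's x/y toggle flags, the `low` interval pointer and the two player accumulators.
import Mathlib
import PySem

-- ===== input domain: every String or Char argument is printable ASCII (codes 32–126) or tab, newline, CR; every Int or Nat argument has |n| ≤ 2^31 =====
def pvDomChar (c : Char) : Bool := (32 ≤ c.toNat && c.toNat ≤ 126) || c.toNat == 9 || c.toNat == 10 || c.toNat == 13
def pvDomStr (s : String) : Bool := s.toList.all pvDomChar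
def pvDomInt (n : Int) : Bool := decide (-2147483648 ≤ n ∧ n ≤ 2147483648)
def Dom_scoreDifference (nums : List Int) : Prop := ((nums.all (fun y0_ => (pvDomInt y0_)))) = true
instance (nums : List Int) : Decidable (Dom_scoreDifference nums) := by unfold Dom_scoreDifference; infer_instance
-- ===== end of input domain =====

-- B replaces A's stateful toggle machinery (x/y flags, `low` pointer, two accumulators) with a
-- closed-form sign: staged passes build prefix odd-counts, then a signed sum uses (-1)^(c + (i+1)//6).

-- ===== PORT A =====
-- loop of A: state (x, y, low, player1, player2), i the running index
def scoreDifferenceGoA (rest : List Int) (i : Nat) (x y : Bool) (low p1 p2 : Int) : Int :=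
  match rest with
  | [] => p1 - p2
  | v :: rs =>
    let xy := if PySem.Int.mod v 2 == 1 then (if x then (false, true) else (true, false)) else (x, y)
    let x := xy.1; let y := xy.2
    let xyl := if ((i : Int) - low) == 5 then
        (if x then (false, true, (i : Int) + 1) else (true, false, (i : Int) + 1))
      else (x, y, low)
    let x := xyl.1; let y := xyl.2.1; let low := xyl.2.2
    let pp := if x then (p1 + v, p2) else (p1, p2 + v)
    scoreDifferenceGoA rs (i + 1) x y low pp.1 pp.2

def scoreDifference (nums : List Int) : Int :=
  scoreDifferenceGoA nums 0 true false 0 0 0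

-- ===== PORT B =====
-- the `prefix` loop of B: inclusive prefix counts of odd values, carried count c
def scoreDifferencePrefB (l : List Int) (c : Int) : List Int :=
  match l with
  | [] => []
  | v :: rs => (c + PySem.Int.mod v 2) :: scoreDifferencePrefB rs (c + PySem.Int.mod v 2)

def scoreDifference_alt (nums : List Int) : Int :=
  ((PySem.List.enumerate (nums.zip (scoreDifferencePrefB nums 0)) 0).map
    (fun p => p.2.1 *
      ((-1 : Int) ^ ((PySem.Int.mod (p.2.2 + PySem.Int.floordiv (p.1 + 1) 6) 2).toNat)))).sum

-- ===== PRECONDITION & SPEC =====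
def Spec_scoreDifference (nums : List Int) (out : Int) : Prop := out = scoreDifference_alt nums
instance (nums : List Int) (out : Int) : Decidable (Spec_scoreDifference nums out) := by unfold Spec_scoreDifference; infer_instance

-- ===== CLAIM (what is proved, stated in full; the proofs are below) =====
def Claim_equal_scoreDifference : Prop := ∀ (nums : List Int), Dom_scoreDifference nums → Spec_scoreDifference nums (scoreDifference nums)

-- ===== LEMMAS AND PROOFS =====

-- proof-side recursive form of B's signed sum, with explicit start index and carried count
def Bsum (rest : List Int) (i : Nat) (c : Int) : Int :=
  match rest with
  | [] => 0
  | v :: rs =>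
    let c' := c + PySem.Int.mod v 2
    v * ((-1 : Int) ^ ((PySem.Int.mod (c' + (((i + 1) / 6 : Nat) : Int)) 2).toNat)) + Bsum rs (i + 1) c'

-- B's enumerate/zip/map/sum pipeline computes Bsum
theorem alt_eq_Bsum (l : List Int) : ∀ (i : Nat) (c : Int),
    ((PySem.List.enumerate (l.zip (scoreDifferencePrefB l c)) (i : Int)).map
      (fun p => p.2.1 *
        ((-1 : Int) ^ ((PySem.Int.mod (p.2.2 + PySem.Int.floordiv (p.1 + 1) 6) 2).toNat)))).sum
      = Bsum l i c := by
  induction l with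
  | nil => intro i c; simp [scoreDifferencePrefB, Bsum, PySem.List.enumerate_nil]
  | cons v rs ih =>
    intro i c
    have hcast : ((i : Int) + 1) = (((i + 1 : Nat)) : Int) := by push_cast; ring
    have hfd : PySem.Int.floordiv (((i + 1 : Nat)) : Int) 6 = (((i + 1) / 6 : Nat) : Int) := by
      rw [PySem.Int.floordiv_eq_ediv_of_pos (by omega)]; omega
    simp only [scoreDifferencePrefB, List.zip_cons_cons, PySem.List.enumerate_cons,
      List.map_cons, List.sum_cons, Bsum]
    rw [hcast, hfd, ih (i + 1) (c + PySem.Int.mod v 2)]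

-- loop invariant: A's flag x holds iff (odd count so far + i/6) is even, low = 6*(i/6);
-- under it A's running difference p1 - p2 plus Bsum gives A's result.
theorem go_eq (rest : List Int) : ∀ (i : Nat) (x y : Bool) (low p1 p2 c : Int),
    (x = true ↔ (c + ((i / 6 : Nat) : Int)) % 2 = 0) → low = ((6 * (i / 6) : Nat) : Int) →
    scoreDifferenceGoA rest i x y low p1 p2 = p1 - p2 + Bsum rest i c := by
  induction rest with
  | nil => intro i x y low p1 p2 c hx hl; simp [scoreDifferenceGoA, Bsum]
  | cons v rs ih =>
    intro i x y low p1 p2 c hx hl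
    have hm2 : ∀ s : Int, PySem.Int.mod s 2 = s % 2 := fun s => PySem.Int.mod_eq_emod_of_pos (by omega)
    simp only [scoreDifferenceGoA, Bsum, hm2]
    have hb : ((i : Int) - low = 5) ↔ ((i + 1) % 6 = 0) := by rw [hl]; push_cast; omega
    have hv2 : v % 2 = 0 ∨ v % 2 = 1 := Int.emod_two_eq v
    have hxx : x = true ∨ x = false := by cases x <;> simp
    by_cases hbnd : (i + 1) % 6 = 0
    · have hbeq : (((i : Int) - low) == 5) = true := by rw [beq_iff_eq]; exact hb.mpr hbnd
      have hlow : ((i : Int) + 1) = ((6 * ((i + 1) / 6) : Nat) : Int) := by push_cast; omega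
      rcases hv2 with hodd | hodd
      · have ho : ((v % 2 : Int) == 1) = false := by simp [hodd]
        rcases hxx with hxv | hxv
        · have ht : (c + ((i / 6 : Nat) : Int)) % 2 = 0 := hx.mp hxv
          have he : (c + v % 2 + (((i + 1) / 6 : Nat) : Int)) % 2 = 1 := by omega
          subst hxv
          simp only [ho, hbeq, he]
          simp
          rw [ih (i + 1) false true ((i : Int) + 1) p1 (p2 + v) (c + v % 2)
            (iff_of_false (by simp) (by omega)) hlow]
          ring_nf
        · have ht : (c + ((i / 6 : Nat) : Int)) % 2 = 1 := by
            rcases Int.emod_two_eq (c + ((i / 6 : Nat) : Int)) with h | h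
            · exact absurd (hx.mpr h) (by simp [hxv])
            · exact h
          have he : (c + v % 2 + (((i + 1) / 6 : Nat) : Int)) % 2 = 0 := by omega
          subst hxv
          simp only [ho, hbeq, he]
          simp
          rw [ih (i + 1) true false ((i : Int) + 1) (p1 + v) p2 (c + v % 2)
            (iff_of_true rfl (by omega)) hlow]
          ring_nf
      · have ho : ((v % 2 : Int) == 1) = true := by simp [hodd]
        rcases hxx with hxv | hxv
        · have ht : (c + ((i / 6 : Nat) : Int)) % 2 = 0 := hx.mp hxv
          have he : (c + v % 2 + (((i + 1) / 6 : Nat) : Int)) % 2 = 0 := by omega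
          subst hxv
          simp only [ho, hbeq, he]
          simp
          rw [ih (i + 1) true false ((i : Int) + 1) (p1 + v) p2 (c + v % 2)
            (iff_of_true rfl (by omega)) hlow]
          ring_nf
        · have ht : (c + ((i / 6 : Nat) : Int)) % 2 = 1 := by
            rcases Int.emod_two_eq (c + ((i / 6 : Nat) : Int)) with h | h
            · exact absurd (hx.mpr h) (by simp [hxv])
            · exact h
          have he : (c + v % 2 + (((i + 1) / 6 : Nat) : Int)) % 2 = 1 := by omega
          subst hxv
          simp only [ho, hbeq, he]
          simp
          rw [ih (i + 1) false true ((i : Int) + 1) p1 (p2 + v) (c + v % 2)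
            (iff_of_false (by simp) (by omega)) hlow]
          ring_nf
    · have hbeq : (((i : Int) - low) == 5) = false := by
        rw [beq_eq_false_iff_ne]; exact fun h => hbnd (hb.mp h)
      have hlow : low = ((6 * ((i + 1) / 6) : Nat) : Int) := by rw [hl]; push_cast; omega
      rcases hv2 with hodd | hodd
      · have ho : ((v % 2 : Int) == 1) = false := by simp [hodd]
        rcases hxx with hxv | hxv
        · have ht : (c + ((i / 6 : Nat) : Int)) % 2 = 0 := hx.mp hxv
          have he : (c + v % 2 + (((i + 1) / 6 : Nat) : Int)) % 2 = 0 := by omega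
          subst hxv
          simp only [ho, hbeq, he]
          simp
          rw [ih (i + 1) true y low (p1 + v) p2 (c + v % 2)
            (iff_of_true rfl (by omega)) hlow]
          ring_nf
        · have ht : (c + ((i / 6 : Nat) : Int)) % 2 = 1 := by
            rcases Int.emod_two_eq (c + ((i / 6 : Nat) : Int)) with h | h
            · exact absurd (hx.mpr h) (by simp [hxv])
            · exact h
          have he : (c + v % 2 + (((i + 1) / 6 : Nat) : Int)) % 2 = 1 := by omega
          subst hxv
          simp only [ho, hbeq, he]
          simp
          rw [ih (i + 1) false y low p1 (p2 + v) (c + v % 2)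
            (iff_of_false (by simp) (by omega)) hlow]
          ring_nf
      · have ho : ((v % 2 : Int) == 1) = true := by simp [hodd]
        rcases hxx with hxv | hxv
        · have ht : (c + ((i / 6 : Nat) : Int)) % 2 = 0 := hx.mp hxv
          have he : (c + v % 2 + (((i + 1) / 6 : Nat) : Int)) % 2 = 1 := by omega
          subst hxv
          simp only [ho, hbeq, he]
          simp
          rw [ih (i + 1) false true low p1 (p2 + v) (c + v % 2)
            (iff_of_false (by simp) (by omega)) hlow]
          ring_nf
        · have ht : (c + ((i / 6 : Nat) : Int)) % 2 = 1 := by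
            rcases Int.emod_two_eq (c + ((i / 6 : Nat) : Int)) with h | h
            · exact absurd (hx.mpr h) (by simp [hxv])
            · exact h
          have he : (c + v % 2 + (((i + 1) / 6 : Nat) : Int)) % 2 = 0 := by omega
          subst hxv
          simp only [ho, hbeq, he]
          simp
          rw [ih (i + 1) true false low (p1 + v) p2 (c + v % 2)
            (iff_of_true rfl (by omega)) hlow]
          ring_nf

-- ===== VERDICT (by name: the statement is the Claim_ definition above) =====
theorem scoreDifference_spec : Claim_equal_scoreDifference := by
  intro nums _
  unfold Spec_scoreDifference scoreDifference scoreDifference_alt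
  have h1 := alt_eq_Bsum nums 0 0
  have h2 := go_eq nums 0 true false 0 0 0 0 (by simp) (by simp)
  simp only [Nat.cast_zero] at h1 h2
  rw [h2, h1]
  ring
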